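-- pv_equiv track=rewrite | github.com/dkkim0122/Algorithm | baekjoon/10000/10000.py | cal_circles
-- ===== SOURCE A (Python) =====
-- def cal_circles(circles: list) -> int:
--     coord = []
--     stack = []
--
--     # 좌표를 원 왼쪽 점 0, 오른쪽 점 1로 나눈 후 정렬
--     # [2,12], [-20,2], [2,20], [-20,20]의 경우
--     # [0,2],[1,12],[0,-20],[1,2],[0,2],[1,20],[0,-20],[1,20]
--     # 정렬 후 [1,12],[1,2],[1,20],[1,20],[0,2],[0,-20],[0,2],[0,-20]
--     # 정렬 후 [0,-20],[0,-20],[1,2],[0,2],[0,2],[1,12],[1,20],[1,20]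
--     for circle in circles:
--         left = circle[0]
--         right = circle[1]
--         coord.append([0, left])
--         coord.append([1, right])
--
--     coord = sorted(coord, reverse=True) # 먼저 오른쪽 -> 왼쪽 순으로 정렬한 다음
--     coord = sorted(coord, key = lambda x:x[1]) # 같은 좌표 상 오른쪽이 먼저 오게(원을 닫는 것을 먼저)
--
--
--     # stack 원소에 원을 넣을 때는 [2, 지름]으로 push한다.
--
--     # 스택에서 바로 최근 원소(가장 가까운 왼쪽 좌표)를 pop해 이 원의 지름을 구한다.
--     #
--
--     count = 1
--
--     for lr, x in coord:
--         if lr == 0:  # 원이 열릴 때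
--             stack.append([lr, x])
--         else:   # 원이 닫힐 때
--             sum_diameter = 0  # 일단 원의 지름의 합을 넣는 변수 sum_diameter를 만든다
--             while stack and stack[-1][0] == 2: # 만약 stack 가장 최근 원소가 원이면
--                 _, complete_circle = stack.pop() # 다시 pop해준 다음
--                 sum_diameter += complete_circle # 해당 지름을 diameter에 더해준다.
--
--             diameter = x - stack.pop()[1]   # 지름을 구한다
--
--             if diameter == sum_diameter:    # 만약 지금까지 더한 지름의 합이 해당 원 지름과 같다면 끊김없이 붙어있는 것.
--                 count += 2
--             else:
--                 count += 1
--             stack.append([2, diameter])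
--
--
--     return count
-- ===== SOURCE B (Python) =====
-- def cal_circles(circles: list) -> int:
--     # One stack of open frames [left_x, child_diameter_sum]; child diameters are
--     # accumulated eagerly, so no [2, ...] sentinel entries and no inner while-loop.
--     events = []
--     for circle in circles:
--         events.append((circle[0], 1))   # open  (tag 1)
--         events.append((circle[1], 0))   # close (tag 0) -- sorts before opens at ties
--     events.sort()
--
--     count = 1
--     stack = [[0, 0]]                    # bottom frame collects top-level diameters
--     for x, tag in events:
--         if tag == 1:
--             stack.append([x, 0])
--         else:
--             left, child = stack.pop()
--             d = x - left
--             count += 2 if d == child else 1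
--             stack[-1][1] += d
--     return count
-- ===== Notes on version B (the rewrite author's own statement) =====
-- stated objective: simpler
-- what changed: Instead of pushing [2,diameter] sentinel entries and re-scanning them with an inner while-loop at every close, B keeps one stack of open frames [left_x, child_sum] and adds each closed diameter to the enclosing frame eagerly, so a close is a single pop plus one addition; the event sort (coordinate ascending, closes before opens) is a single tuple sort instead of A's two-pass reverse-then-stable-key sort.
import Mathlib
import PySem

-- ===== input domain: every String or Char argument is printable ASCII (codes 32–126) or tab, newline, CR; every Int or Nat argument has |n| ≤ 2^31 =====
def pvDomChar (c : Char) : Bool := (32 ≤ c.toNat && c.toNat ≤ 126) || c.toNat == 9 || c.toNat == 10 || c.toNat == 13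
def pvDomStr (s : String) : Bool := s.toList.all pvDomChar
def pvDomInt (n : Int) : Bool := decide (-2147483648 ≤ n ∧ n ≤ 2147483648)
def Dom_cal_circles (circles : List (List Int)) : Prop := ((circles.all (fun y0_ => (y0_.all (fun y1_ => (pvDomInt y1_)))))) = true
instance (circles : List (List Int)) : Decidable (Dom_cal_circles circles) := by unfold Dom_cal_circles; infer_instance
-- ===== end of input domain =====

-- B replaces A's [2,diameter] sentinel entries and inner while-scan by a stack of
-- open frames that accumulate child diameters eagerly (objective: simpler).
-- Stacks are represented head-as-top (the head is Python's list end).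

-- ===== PORT A =====
-- inner while-loop: pop [2,d] entries, summing their diameters
def pvPopA : List (List Int) → Int → Int × List (List Int)
  | [], s => (s, [])
  | top :: rest, s =>
    if PySem.List.pyGetD top 0 0 == 2 then
      pvPopA rest (s + PySem.List.pyGetD top 1 0)
    else (s, top :: rest)

-- body of A's `for lr, x in coord` loop
def pvStepA (st : Int × List (List Int)) (e : List Int) : Int × List (List Int) :=
  let lr := PySem.List.pyGetD e 0 0
  let x := PySem.List.pyGetD e 1 0
  if lr == 0 then (st.1, [lr, x] :: st.2)
  else
    let r := pvPopA st.2 0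
    match r.2 with
    | [] => (st.1, [])   -- Python raises IndexError (stack.pop() on empty); excluded by Pre_
    | top :: rest =>
      let d := x - PySem.List.pyGetD top 1 0
      ((if d == r.1 then st.1 + 2 else st.1 + 1), [2, d] :: rest)

def cal_circles (circles : List (List Int)) : Int :=
  let coord := circles.foldl (fun acc c =>
      acc ++ [[0, PySem.List.pyGetD c 0 0], [1, PySem.List.pyGetD c 1 0]]) ([] : List (List Int))
  let coord1 := PySem.List.sorted coord (fun e => e) true
  let coord2 := PySem.List.sorted coord1 (fun e => PySem.List.pyGetD e 1 0) false
  (coord2.foldl pvStepA (1, [])).1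

-- ===== PORT B =====
-- body of B's `for x, tag in events` loop; frames are (left_x, child_sum)
def pvStepB (st : Int × List (Int × Int)) (e : Int × Int) : Int × List (Int × Int) :=
  if e.2 == 1 then (st.1, (e.1, 0) :: st.2)
  else
    match st.2 with
    | [] => (st.1, [])   -- Python raises IndexError (stack.pop() on empty); excluded by Pre_
    | (left, child) :: rest =>
      let d := e.1 - left
      let cnt := if d == child then st.1 + 2 else st.1 + 1
      match rest with
      | [] => (cnt, [])  -- Python raises IndexError (stack[-1] on empty); excluded by Pre_
      | (l2, c2) :: rest2 => (cnt, (l2, c2 + d) :: rest2)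

def cal_circles_alt (circles : List (List Int)) : Int :=
  let events := circles.foldl (fun acc c =>
      acc ++ [(PySem.List.pyGetD c 0 0, 1), (PySem.List.pyGetD c 1 0, 0)]) ([] : List (Int × Int))
  let events := PySem.List.sorted2 events Prod.fst Prod.snd false
  (events.foldl pvStepB (1, [(0, 0)])).1

-- ===== PRECONDITION & SPEC =====
-- Pre_ excludes exactly the inputs on which BOTH Pythons raise IndexError: a circle entry
-- shorter than 2 (circle[1] fails), or an unmatched close event — some circle's right
-- endpoint v has more closes at coordinates ≤ v than opens at coordinates < v, so the sweep
-- pops an empty stack.  It is a counting condition on the input; no input on which A returns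
-- is excluded.
def Pre_cal_circles (circles : List (List Int)) : Prop :=
  (∀ c ∈ circles, 2 ≤ c.length) ∧
  ∀ c ∈ circles,
    circles.countP (fun c' => decide (PySem.List.pyGetD c' 1 0 ≤ PySem.List.pyGetD c 1 0))
      ≤ circles.countP (fun c' => decide (PySem.List.pyGetD c' 0 0 < PySem.List.pyGetD c 1 0))
instance (circles : List (List Int)) : Decidable (Pre_cal_circles circles) := by
  unfold Pre_cal_circles; infer_instance

def pvWitness_cal_circles : List (List Int) := [[0, 2], [-1, 5]]

def Spec_cal_circles (circles : List (List Int)) (out : Int) : Prop := out = cal_circles_alt circles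
instance (circles : List (List Int)) (out : Int) : Decidable (Spec_cal_circles circles out) := by
  unfold Spec_cal_circles; infer_instance

-- ===== CLAIM (what is proved, stated in full; the proofs are below) =====
def Claim_equal_cal_circles : Prop := ∀ (circles : List (List Int)), Dom_cal_circles circles → Pre_cal_circles circles → Spec_cal_circles circles (cal_circles circles)

-- ===== LEMMAS AND PROOFS =====

theorem pvGet1 (t v : Int) : PySem.List.pyGetD [t, v] 1 0 = v := rfl

theorem pvGet0 (t v : Int) : PySem.List.pyGetD [t, v] 0 0 = t := rfl

theorem pvListLt (a b c d : Int) : (([a, b] : List Int) < [c, d]) ↔ (a < c ∨ (a = c ∧ b < d)) := by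
  simp [List.cons_lt_cons_iff]

def pvEvt (e : List Int) : Int × Int := (PySem.List.pyGetD e 1 0, 1 - PySem.List.pyGetD e 0 0)

def pvRawA (circles : List (List Int)) : List (List Int) :=
  circles.foldl (fun acc c =>
      acc ++ [[0, PySem.List.pyGetD c 0 0], [1, PySem.List.pyGetD c 1 0]]) []

def pvRawB (circles : List (List Int)) : List (Int × Int) :=
  circles.foldl (fun acc c =>
      acc ++ [(PySem.List.pyGetD c 0 0, 1), (PySem.List.pyGetD c 1 0, 0)]) []

def pvEvA (circles : List (List Int)) : List (List Int) :=
  PySem.List.sorted (PySem.List.sorted (pvRawA circles) (fun e => e) true)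
    (fun e => PySem.List.pyGetD e 1 0) false

def pvEvB (circles : List (List Int)) : List (Int × Int) :=
  PySem.List.sorted2 (pvRawB circles) Prod.fst Prod.snd false

def pvLe (u v : Int × Int) : Prop := u.1 < v.1 ∨ (u.1 = v.1 ∧ u.2 ≤ v.2)

inductive pvSR : List (List Int) → List (Int × Int) → Prop
  | base (ds : List Int) (c : Int) (h : ds.sum = c) :
      pvSR (ds.map fun d => [2, d]) [(0, c)]
  | frame (ds : List Int) (c l : Int) (sa : List (List Int)) (rest : List (Int × Int))
      (h : ds.sum = c) (hr : pvSR sa rest) :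
      pvSR ((ds.map fun d => [2, d]) ++ [0, l] :: sa) ((l, c) :: rest)

def pvBal (n : Nat) (L : List (Int × Int)) : Prop :=
  ∀ k : Nat, (L.take k).countP (fun e => e.2 == 0) ≤ n + (L.take k).countP (fun e => e.2 == 1)

theorem pv_ins_one {α : Type} (before : α → α → Bool) (p : α → α → Prop)
    (T1 : ∀ x y z, before x y = true → before z y = false → before x z = true)
    (T2 : ∀ x y, before x y = true → before y x = false) (x : α) :
    ∀ acc : List α,
      acc.Pairwise (fun a b => before b a = false ∧ (before a b = true ∨ p a b)) →
      (∀ y ∈ acc, p y x) →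
      (PySem.List.insertBy before x acc).Pairwise
        (fun a b => before b a = false ∧ (before a b = true ∨ p a b)) := by
  intro acc
  induction acc with
  | nil => intro _ _; simp [PySem.List.insertBy]
  | cons y ys ih =>
    intro hp hyx
    rw [List.pairwise_cons] at hp
    obtain ⟨hy, hys⟩ := hp
    show (if before x y = true then x :: y :: ys else y :: PySem.List.insertBy before x ys).Pairwise _
    by_cases hxy : before x y = true
    · simp only [hxy, if_pos]
      constructor
      · intro z hz
        rcases List.mem_cons.mp hz with rfl | hz
        · exact ⟨T2 _ _ hxy, Or.inl hxy⟩
        · have hzy : before z y = false := (hy z hz).1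
          exact ⟨T2 _ _ (T1 x y z hxy hzy), Or.inl (T1 x y z hxy hzy)⟩
      · exact List.pairwise_cons.mpr ⟨hy, hys⟩
    · have hxy' : before x y = false := by simpa using hxy
      simp only [hxy]
      constructor
      · intro z hz
        rcases (PySem.List.mem_insertBy before x z ys).mp hz with rfl | hz
        · exact ⟨hxy', Or.inr (hyx y (by simp))⟩
        · exact hy z hz
      · exact ih hys (fun y' hy' => hyx y' (by simp [hy']))

theorem pv_insertBy_pairwise {α : Type} (before : α → α → Bool) (p : α → α → Prop)
    (T1 : ∀ x y z, before x y = true → before z y = false → before x z = true)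
    (T2 : ∀ x y, before x y = true → before y x = false) :
    ∀ (l acc : List α),
    acc.Pairwise (fun a b => before b a = false ∧ (before a b = true ∨ p a b)) →
    (∀ y ∈ acc, ∀ x ∈ l, p y x) → l.Pairwise p →
    (l.foldl (fun acc x => PySem.List.insertBy before x acc) acc).Pairwise
      (fun a b => before b a = false ∧ (before a b = true ∨ p a b)) := by
  intro l
  induction l with
  | nil => intro acc h _ _; simpa using h
  | cons x xs ih =>
    intro acc hacc hcross hl
    rw [List.pairwise_cons] at hl
    simp only [List.foldl_cons]
    apply ih
    · exact pv_ins_one before p T1 T2 x acc hacc (fun y hy => hcross y hy x (by simp))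
    · intro y hy z hz
      rcases (PySem.List.mem_insertBy before x y acc).mp hy with rfl | hy
      · exact hl.1 z hz
      · exact hcross y hy z (by simp [hz])
    · exact hl.2

theorem pv_rawB_eq_map (circles : List (List Int)) : pvRawB circles = (pvRawA circles).map pvEvt := by
  unfold pvRawA pvRawB
  suffices h : ∀ (cs : List (List Int)) (acc : List (List Int)),
      cs.foldl (fun acc c => acc ++ [(PySem.List.pyGetD c 0 0, 1), (PySem.List.pyGetD c 1 0, 0)]) (acc.map pvEvt)
        = (cs.foldl (fun acc c => acc ++ [[0, PySem.List.pyGetD c 0 0], [1, PySem.List.pyGetD c 1 0]]) acc).map pvEvt by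
    simpa using h circles []
  intro cs
  induction cs with
  | nil => intro acc; simp
  | cons c cs ih =>
    intro acc
    simp only [List.foldl_cons]
    rw [← ih]
    congr 1
    simp [pvEvt]
    constructor <;> rfl

theorem pv_shape_raw (circles : List (List Int)) :
    ∀ e ∈ pvRawA circles, ∃ v : Int, e = [0, v] ∨ e = [1, v] := by
  unfold pvRawA
  suffices h : ∀ (cs : List (List Int)) (acc : List (List Int)),
      (∀ e ∈ acc, ∃ v : Int, e = [0, v] ∨ e = [1, v]) →
      ∀ e ∈ cs.foldl (fun acc c => acc ++ [[0, PySem.List.pyGetD c 0 0], [1, PySem.List.pyGetD c 1 0]]) acc,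
        ∃ v : Int, e = [0, v] ∨ e = [1, v] by
    exact h circles [] (by simp)
  intro cs
  induction cs with
  | nil => intro acc h; simpa using h
  | cons c cs ih =>
    intro acc h
    apply ih
    intro e he
    rcases List.mem_append.mp he with he | he
    · exact h e he
    · rcases List.mem_cons.mp he with rfl | he
      · exact ⟨_, Or.inl rfl⟩
      · simp at he; exact ⟨_, Or.inr (by rw [he])⟩

theorem pv_shape (circles : List (List Int)) :
    ∀ e ∈ pvEvA circles, ∃ v : Int, e = [0, v] ∨ e = [1, v] := by
  intro e he
  apply pv_shape_raw circles
  have h1 := (PySem.List.mem_sorted (xs := PySem.List.sorted (pvRawA circles) (fun e => e) true)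
      (key := fun e => PySem.List.pyGetD e 1 0) (rev := false) (x := e)).mp he
  exact (PySem.List.mem_sorted (xs := pvRawA circles) (key := fun e => e) (rev := true) (x := e)).mp h1

theorem pv_pairwise_evA (circles : List (List Int)) :
    (pvEvA circles).Pairwise (fun a b =>
      (decide (PySem.List.pyGetD b 1 0 < PySem.List.pyGetD a 1 0) = false) ∧
      (decide (PySem.List.pyGetD a 1 0 < PySem.List.pyGetD b 1 0) = true ∨ ¬ (a < b))) := by
  unfold pvEvA
  rw [PySem.List.sorted_eq_foldl_insertBy]
  have h1 : (PySem.List.sorted (pvRawA circles) (fun e => e) true).Pairwise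
      (fun a b : List Int => ¬ (a < b)) := by
    rw [PySem.List.sorted_rev_eq_foldl_insertBy]
    have := pv_insertBy_pairwise (fun a b : List Int => decide (b < a)) (fun _ _ => True)
      (by intro x y z h1 h2; simp at *; exact lt_of_le_of_lt h2 h1)
      (by intro x y h; simp at *; exact le_of_lt h)
      (pvRawA circles) [] (by simp) (by simp) (by induction pvRawA circles <;> simp_all)
    exact this.imp (fun h => by simpa using h.1)
  exact pv_insertBy_pairwise (fun a b => decide (PySem.List.pyGetD a 1 0 < PySem.List.pyGetD b 1 0))
    (fun a b : List Int => ¬ (a < b))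
    (by intro x y z h1 h2; simp at *; omega)
    (by intro x y h; simp at *; omega)
    _ [] (by simp) (by simp) h1

theorem pv_pairwise_map (circles : List (List Int)) :
    ((pvEvA circles).map pvEvt).Pairwise pvLe := by
  rw [List.pairwise_map]
  apply List.Pairwise.imp_of_mem ?_ (pv_pairwise_evA circles)
  intro a b ha hb h
  obtain ⟨va, hva⟩ := pv_shape circles a ha
  obtain ⟨vb, hvb⟩ := pv_shape circles b hb
  obtain ⟨h1, h2⟩ := h
  simp only [decide_eq_false_iff_not, decide_eq_true_eq] at h1 h2
  rcases hva with rfl | rfl <;> rcases hvb with rfl | rfl <;>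
    · simp only [pvEvt, pvLe, pvGet0, pvGet1] at h1 h2 ⊢
      rcases h2 with h2 | h2
      · exact Or.inl h2
      · rw [pvListLt] at h2; omega

theorem pv_pairwise_evB (circles : List (List Int)) :
    (pvEvB circles).Pairwise pvLe := by
  unfold pvEvB
  have h := pv_insertBy_pairwise
    (fun a b : Int × Int => decide (a.1 < b.1) || (!decide (b.1 < a.1) && decide (a.2 < b.2)))
    (fun _ _ => True)
    (by intro x y z h1 h2; simp at *; omega)
    (by intro x y h; simp at *; omega)
    (pvRawB circles) [] (by simp) (by simp) (by induction pvRawB circles <;> simp_all)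
  have he : PySem.List.sorted2 (pvRawB circles) Prod.fst Prod.snd false
      = (pvRawB circles).foldl (fun acc x => PySem.List.insertBy
          (fun a b : Int × Int => decide (a.1 < b.1) || (!decide (b.1 < a.1) && decide (a.2 < b.2))) x acc) [] := rfl
  rw [he]
  refine h.imp (fun hab => ?_)
  obtain ⟨h1, _⟩ := hab
  simp only [pvLe]
  simp at h1
  omega

theorem pv_evB_eq_map (circles : List (List Int)) :
    pvEvB circles = (pvEvA circles).map pvEvt := by
  apply List.Perm.eq_of_pairwise (le := pvLe)
  · intro a b _ _ h1 h2
    obtain ⟨_, _⟩ := a; obtain ⟨_, _⟩ := b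
    simp [pvLe, Prod.mk.injEq] at *
    constructor <;> omega
  · exact pv_pairwise_evB circles
  · exact pv_pairwise_map circles
  · have p1 : (pvEvB circles).Perm (pvRawB circles) := PySem.List.sorted2_perm _ _ _ _
    rw [pv_rawB_eq_map] at p1
    exact p1.trans (List.Perm.map _
      ((PySem.List.sorted_perm _ _ _).trans (PySem.List.sorted_perm _ _ _)).symm)

theorem pv_bal_open (v : Int) (n : Nat) (L : List (Int × Int))
    (h : pvBal n ((v, 1) :: L)) : pvBal (n + 1) L := by
  intro k; have := h (k + 1); simp [List.take_succ_cons] at this; omega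

theorem pv_bal_close (v : Int) (n : Nat) (L : List (Int × Int))
    (h : pvBal n ((v, 0) :: L)) : 1 ≤ n ∧ pvBal (n - 1) L := by
  have h1 := h 1
  simp at h1
  refine ⟨by omega, fun k => ?_⟩
  have := h (k + 1)
  simp [List.take_succ_cons] at this
  omega

theorem pv_le_refl (m : Int × Int) : pvLe m m := Or.inr ⟨rfl, le_refl _⟩

-- close/open counts over the raw event list are counts over the circle list
theorem pv_count_close (circles : List (List Int)) (v : Int) :
    (pvRawB circles).countP (fun e => e.2 == 0 && decide (e.1 ≤ v))
      = circles.countP (fun c => decide (PySem.List.pyGetD c 1 0 ≤ v)) := by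
  unfold pvRawB
  suffices h : ∀ (cs : List (List Int)) (acc : List (Int × Int)),
      (cs.foldl (fun acc c => acc ++ [(PySem.List.pyGetD c 0 0, 1), (PySem.List.pyGetD c 1 0, 0)]) acc).countP
          (fun e => e.2 == 0 && decide (e.1 ≤ v))
        = acc.countP (fun e => e.2 == 0 && decide (e.1 ≤ v))
          + cs.countP (fun c => decide (PySem.List.pyGetD c 1 0 ≤ v)) by
    simpa using h circles []
  intro cs
  induction cs with
  | nil => intro acc; simp
  | cons c cs ih =>
    intro acc
    simp only [List.foldl_cons, List.countP_cons, ih, List.countP_append, List.countP_cons,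
      List.countP_nil]
    norm_num
    split_ifs <;> omega

theorem pv_count_open (circles : List (List Int)) (v : Int) :
    (pvRawB circles).countP (fun e => e.2 == 1 && decide (e.1 < v))
      = circles.countP (fun c => decide (PySem.List.pyGetD c 0 0 < v)) := by
  unfold pvRawB
  suffices h : ∀ (cs : List (List Int)) (acc : List (Int × Int)),
      (cs.foldl (fun acc c => acc ++ [(PySem.List.pyGetD c 0 0, 1), (PySem.List.pyGetD c 1 0, 0)]) acc).countP
          (fun e => e.2 == 1 && decide (e.1 < v))
        = acc.countP (fun e => e.2 == 1 && decide (e.1 < v))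
          + cs.countP (fun c => decide (PySem.List.pyGetD c 0 0 < v)) by
    simpa using h circles []
  intro cs
  induction cs with
  | nil => intro acc; simp
  | cons c cs ih =>
    intro acc
    simp only [List.foldl_cons, List.countP_cons, ih, List.countP_append, List.countP_cons,
      List.countP_nil]
    norm_num
    split_ifs <;> omega

theorem pv_raw_count (circles : List (List Int)) (hpre : Pre_cal_circles circles) (v : Int) :
    (pvRawB circles).countP (fun e => e.2 == 0 && decide (e.1 ≤ v))
      ≤ (pvRawB circles).countP (fun e => e.2 == 1 && decide (e.1 < v)) := by
  rw [pv_count_close, pv_count_open]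
  set F := circles.filter (fun c => decide (PySem.List.pyGetD c 1 0 ≤ v)) with hF
  rcases hm : PySem.List.max? F (fun c => PySem.List.pyGetD c 1 0) with _ | m
  · -- no circle has right endpoint ≤ v: the close count is 0
    have hFe : F = [] := (PySem.List.max?_eq_none_iff _ _).mp hm
    have : circles.countP (fun c => decide (PySem.List.pyGetD c 1 0 ≤ v)) = 0 := by
      rw [List.countP_eq_zero]
      intro c hc hcv
      have : c ∈ F := List.mem_filter.mpr ⟨hc, hcv⟩
      simp [hFe] at this
    omega
  · have hmF : m ∈ F := PySem.List.max?_mem hm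
    have hmax : ∀ y ∈ F, PySem.List.pyGetD y 1 0 ≤ PySem.List.pyGetD m 1 0 :=
      PySem.List.max?_isMax hm
    obtain ⟨hmc, hmv⟩ := List.mem_filter.mp hmF
    have hmv' : PySem.List.pyGetD m 1 0 ≤ v := by simpa using hmv
    have e1 : circles.countP (fun c => decide (PySem.List.pyGetD c 1 0 ≤ v))
        = circles.countP (fun c => decide (PySem.List.pyGetD c 1 0 ≤ PySem.List.pyGetD m 1 0)) := by
      apply List.countP_congr
      intro c hc
      simp only [decide_eq_true_eq]
      constructor
      · intro h; exact hmax c (List.mem_filter.mpr ⟨hc, by simpa using h⟩)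
      · intro h; omega
    have e2 := hpre.2 m hmc
    have e3 : circles.countP (fun c => decide (PySem.List.pyGetD c 0 0 < PySem.List.pyGetD m 1 0))
        ≤ circles.countP (fun c => decide (PySem.List.pyGetD c 0 0 < v)) := by
      apply List.countP_mono_left
      intro c _ h
      simp at h ⊢
      omega
    omega

theorem pv_bal (circles : List (List Int)) (hpre : Pre_cal_circles circles) :
    pvBal 0 (pvEvB circles) := by
  intro k
  set L := pvEvB circles with hL
  set p := L.take k with hp
  by_cases hne : p = []
  · simp [hne]
  have hPW : L.Pairwise pvLe := pv_pairwise_evB circles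
  have hsplit : p ++ L.drop k = L := List.take_append_drop k L
  have hPW2 : (p ++ L.drop k).Pairwise pvLe := by rw [hsplit]; exact hPW
  obtain ⟨hpp, _, hcross⟩ := List.pairwise_append.mp hPW2
  set m := p.getLast hne with hm
  set v := m.1 with hv
  have ham : ∀ a ∈ p, pvLe a m := by
    intro a ha
    have hsp : p.dropLast ++ [m] = p := List.dropLast_append_getLast hne
    have : (p.dropLast ++ [m]).Pairwise pvLe := by rw [hsp]; exact hpp
    obtain ⟨_, _, hcr⟩ := List.pairwise_append.mp this
    rw [← hsp] at ha
    rcases List.mem_append.mp ha with ha | ha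
    · exact hcr a ha m (by simp)
    · simp at ha; rw [ha]; exact pv_le_refl m
  have hmb : ∀ b ∈ L.drop k, pvLe m b := hcross m (List.getLast_mem hne)
  -- counting chain
  have s1 : p.countP (fun e => e.2 == 0) ≤ p.countP (fun e => e.2 == 0 && decide (e.1 ≤ v)) := by
    apply List.countP_mono_left
    intro a ha h0
    have := ham a ha
    simp only [pvLe] at this
    simp at h0 ⊢
    exact ⟨h0, by omega⟩
  have s2 : p.countP (fun e => e.2 == 0 && decide (e.1 ≤ v))
      ≤ L.countP (fun e => e.2 == 0 && decide (e.1 ≤ v)) := (List.take_sublist k L).countP_le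
  have hperm : L.Perm (pvRawB circles) := PySem.List.sorted2_perm _ _ _ _
  have s3 : L.countP (fun e => e.2 == 0 && decide (e.1 ≤ v))
      = (pvRawB circles).countP (fun e => e.2 == 0 && decide (e.1 ≤ v)) := hperm.countP_eq _
  have s4 := pv_raw_count circles hpre v
  have s5 : (pvRawB circles).countP (fun e => e.2 == 1 && decide (e.1 < v))
      = L.countP (fun e => e.2 == 1 && decide (e.1 < v)) := (hperm.countP_eq _).symm
  have s6 : L.countP (fun e => e.2 == 1 && decide (e.1 < v))
      = p.countP (fun e => e.2 == 1 && decide (e.1 < v))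
        + (L.drop k).countP (fun e => e.2 == 1 && decide (e.1 < v)) := by
    conv_lhs => rw [← hsplit]
    exact List.countP_append
  have s7 : (L.drop k).countP (fun e => e.2 == 1 && decide (e.1 < v)) = 0 := by
    rw [List.countP_eq_zero]
    intro b hb
    have := hmb b hb
    simp only [pvLe] at this
    simp
    intro _
    omega
  have s8 : p.countP (fun e => e.2 == 1 && decide (e.1 < v)) ≤ p.countP (fun e => e.2 == 1) := by
    apply List.countP_mono_left
    intro a _ h0
    simp at h0 ⊢
    exact h0.1
  omega

theorem pv_popA (ds : List Int) (l : Int) (sa : List (List Int)) :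
    ∀ s : Int, pvPopA ((ds.map fun d => [2, d]) ++ [0, l] :: sa) s = (s + ds.sum, [0, l] :: sa) := by
  induction ds with
  | nil => intro s; simp [pvPopA]
  | cons d ds ih =>
    intro s
    show pvPopA ([2, d] :: (ds.map _ ++ [0, l] :: sa)) s = _
    rw [show pvPopA ([2, d] :: (ds.map (fun d => [2,d]) ++ [0, l] :: sa)) s
        = pvPopA (ds.map (fun d => [2,d]) ++ [0, l] :: sa) (s + d) from rfl]
    rw [ih (s + d)]
    simp [List.sum_cons]
    ring

theorem pv_fold_eq (E : List (List Int)) :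
    ∀ (cnt : Int) (sa : List (List Int)) (sb : List (Int × Int)) (n : Nat),
    (∀ e ∈ E, ∃ v : Int, e = [0, v] ∨ e = [1, v]) →
    pvSR sa sb → sb.length = n + 1 → pvBal n (E.map pvEvt) →
    (E.foldl pvStepA (cnt, sa)).1 = ((E.map pvEvt).foldl pvStepB (cnt, sb)).1 := by
  induction E with
  | nil => intro cnt sa sb n _ _ _ _; rfl
  | cons e E ih =>
    intro cnt sa sb n hsh hsr hlen hbal
    obtain ⟨v, hv | hv⟩ := hsh e (by simp)
    · -- open event
      subst hv
      have hA : pvStepA (cnt, sa) [0, v] = (cnt, [0, v] :: sa) := rfl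
      have hB : pvStepB (cnt, sb) (pvEvt [0, v]) = (cnt, (v, 0) :: sb) := rfl
      simp only [List.map_cons, List.foldl_cons, hA, hB]
      apply ih cnt ([0, v] :: sa) ((v, 0) :: sb) (n + 1) (fun e' he' => hsh e' (by simp [he']))
      · exact pvSR.frame [] 0 v sa sb rfl hsr
      · simp [hlen]
      · have : pvEvt [0, v] = (v, 1) := rfl
        exact pv_bal_open v n (E.map pvEvt) (by simpa [this] using hbal)
    · -- close event
      subst hv
      have hev : pvEvt [1, v] = (v, 0) := rfl
      have hbal' : pvBal n ((v, 0) :: E.map pvEvt) := by simpa [hev] using hbal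
      obtain ⟨hn, hbal2⟩ := pv_bal_close v n _ hbal'
      cases hsr with
      | base ds c h =>
        exfalso; simp at hlen; omega
      | frame ds c l sa' rest h hr =>
        have hrest : rest ≠ [] := by
          intro hcon
          rw [hcon] at hlen
          simp at hlen
          omega
        obtain ⟨⟨l2, c2⟩, rest2, rfl⟩ := List.exists_cons_of_ne_nil hrest
        have hA : pvStepA (cnt, (ds.map fun d => [2, d]) ++ [0, l] :: sa') [1, v]
            = ((if (v - l) == ds.sum then cnt + 2 else cnt + 1), [2, v - l] :: sa') := by
          simp only [pvStepA, pvGet0, pvGet1, pv_popA ds l sa' 0]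
          norm_num
        have hB : pvStepB (cnt, (l, c) :: (l2, c2) :: rest2) (v, 0)
            = ((if (v - l) == c then cnt + 2 else cnt + 1), (l2, c2 + (v - l)) :: rest2) := rfl
        simp only [List.map_cons, List.foldl_cons, hev, hA, hB, h]
        apply ih _ _ _ (n - 1) (fun e' he' => hsh e' (by simp [he']))
        · rcases hr with ⟨ds2, c2x, h2⟩ | ⟨ds2, c2x, l2x, sa2, restx, h2, hr2⟩
          · exact pvSR.base ((v - l) :: ds2) (c2 + (v - l)) (by simp [List.sum_cons, ← h2]; ring)
          · exact pvSR.frame ((v - l) :: ds2) (c2 + (v - l)) l2 sa2 rest2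
              (by simp [List.sum_cons, ← h2]; ring) hr2
        · simp at hlen ⊢; omega
        · exact hbal2

-- ===== VERDICT (by name: the statement is the Claim_ definition above) =====
theorem cal_circles_spec : Claim_equal_cal_circles := by
  intro circles _ hpre
  show cal_circles circles = cal_circles_alt circles
  have hA : cal_circles circles = ((pvEvA circles).foldl pvStepA (1, [])).1 := rfl
  have hB : cal_circles_alt circles = ((pvEvB circles).foldl pvStepB (1, [(0, 0)])).1 := rfl
  rw [hA, hB, pv_evB_eq_map]
  exact pv_fold_eq (pvEvA circles) 1 [] [(0, 0)] 0 (pv_shape circles)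
    (pvSR.base [] 0 rfl) rfl (by rw [← pv_evB_eq_map]; exact pv_bal circles hpre)
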